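-- pv_equiv track=rewrite | github.com/aykutssert/astromind-backend | swiss_ephemeris.py | get_dignity
-- ===== SOURCE A (Python) =====
-- from typing import Optional
--
-- DIGNITY_TABLE = {
--     "Sun":     {"Domicile": [0], "Exaltation": [4], "Detriment": [6], "Fall": [10]},
--     "Moon":    {"Domicile": [3], "Exaltation": [1], "Detriment": [9], "Fall": [7]},
--     "Mercury": {"Domicile": [1, 4], "Exaltation": [5], "Detriment": [7, 10], "Fall": [11]},
--     "Venus":   {"Domicile": [1, 11], "Exaltation": [1], "Detriment": [5, 7], "Fall": [7]},
--     "Mars":    {"Domicile": [0], "Exaltation": [9], "Detriment": [6], "Fall": [3]},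
--     "Jupiter": {"Domicile": [8], "Exaltation": [3], "Detriment": [2], "Fall": [9]},
--     "Saturn":  {"Domicile": [9], "Exaltation": [10], "Detriment": [3], "Fall": [4]},
-- }
--
-- def get_dignity(planet_name: str, sign_index: int) -> Optional[str]:
--     """Return dignity string or None."""
--     table = DIGNITY_TABLE.get(planet_name)
--     if not table:
--         return None
--     for dignity, signs in table.items():
--         if sign_index in signs:
--             return dignity
--     return None
-- ===== SOURCE B (Python) =====
-- from typing import Optional
--
-- # Flat literal lookup table: (planet, sign_index) -> dignity.
-- # Collisions in the nested table (Venus sign 1: Domicile vs Exaltation;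
-- # Venus sign 7: Detriment vs Fall) are already resolved in favour of the
-- # first-listed dignity, matching the original scan order.
-- LOOKUP = {
--     ("Sun", 0): "Domicile", ("Sun", 4): "Exaltation",
--     ("Sun", 6): "Detriment", ("Sun", 10): "Fall",
--     ("Moon", 3): "Domicile", ("Moon", 1): "Exaltation",
--     ("Moon", 9): "Detriment", ("Moon", 7): "Fall",
--     ("Mercury", 1): "Domicile", ("Mercury", 4): "Domicile",
--     ("Mercury", 5): "Exaltation", ("Mercury", 7): "Detriment",
--     ("Mercury", 10): "Detriment", ("Mercury", 11): "Fall",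
--     ("Venus", 1): "Domicile", ("Venus", 11): "Domicile",
--     ("Venus", 5): "Detriment", ("Venus", 7): "Detriment",
--     ("Mars", 0): "Domicile", ("Mars", 9): "Exaltation",
--     ("Mars", 6): "Detriment", ("Mars", 3): "Fall",
--     ("Jupiter", 8): "Domicile", ("Jupiter", 3): "Exaltation",
--     ("Jupiter", 2): "Detriment", ("Jupiter", 9): "Fall",
--     ("Saturn", 9): "Domicile", ("Saturn", 10): "Exaltation",
--     ("Saturn", 3): "Detriment", ("Saturn", 4): "Fall",
-- }
--
-- def get_dignity(planet_name: str, sign_index: int) -> Optional[str]: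
--     """Return dignity string or None."""
--     return LOOKUP.get((planet_name, sign_index))
-- ===== Notes on version B (the rewrite author's own statement) =====
-- stated objective: idiomatic
-- what changed: Replaces the per-call scan over the planet's nested dignity dict by a single precomputed flat literal dict keyed by (planet, sign_index) with collisions resolved to the first-listed dignity, so get_dignity is one dict lookup with no loop at call time.
import Mathlib
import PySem

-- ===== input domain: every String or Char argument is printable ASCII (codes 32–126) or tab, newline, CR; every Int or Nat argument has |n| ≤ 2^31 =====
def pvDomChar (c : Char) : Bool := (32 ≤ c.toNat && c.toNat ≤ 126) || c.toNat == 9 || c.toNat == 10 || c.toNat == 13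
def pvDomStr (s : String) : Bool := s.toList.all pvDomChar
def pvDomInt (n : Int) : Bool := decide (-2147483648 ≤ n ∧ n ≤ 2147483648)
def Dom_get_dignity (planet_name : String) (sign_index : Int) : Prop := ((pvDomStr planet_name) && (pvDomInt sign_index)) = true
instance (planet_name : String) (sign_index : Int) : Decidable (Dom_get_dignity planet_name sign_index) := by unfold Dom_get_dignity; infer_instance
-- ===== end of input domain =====

set_option maxRecDepth 4000


-- B replaces A's per-call scan of the nested dignity table by a single lookup in a flat
-- precomputed (planet, sign) -> dignity literal dict, collisions resolved first-wins (idiomatic).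

-- ===== PORT A =====
def DIGNITY_TABLE : PySem.Dict String (PySem.Dict String (List Int)) := PySem.Dict.ofList [
  ("Sun",     PySem.Dict.ofList [("Domicile", [(0:Int)]), ("Exaltation", [4]), ("Detriment", [6]), ("Fall", [10])]),
  ("Moon",    PySem.Dict.ofList [("Domicile", [3]), ("Exaltation", [1]), ("Detriment", [9]), ("Fall", [7])]),
  ("Mercury", PySem.Dict.ofList [("Domicile", [1, 4]), ("Exaltation", [5]), ("Detriment", [7, 10]), ("Fall", [11])]),
  ("Venus",   PySem.Dict.ofList [("Domicile", [1, 11]), ("Exaltation", [1]), ("Detriment", [5, 7]), ("Fall", [7])]),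
  ("Mars",    PySem.Dict.ofList [("Domicile", [0]), ("Exaltation", [9]), ("Detriment", [6]), ("Fall", [3])]),
  ("Jupiter", PySem.Dict.ofList [("Domicile", [8]), ("Exaltation", [3]), ("Detriment", [2]), ("Fall", [9])]),
  ("Saturn",  PySem.Dict.ofList [("Domicile", [9]), ("Exaltation", [10]), ("Detriment", [3]), ("Fall", [4])])]

-- the 'for dignity, signs in table.items(): if sign_index in signs: return dignity' loop
def dignityScan (items : List (String × List Int)) (sign_index : Int) : Option String :=
  match items with
  | [] => none
  | (dignity, signs) :: rest =>
      if signs.contains sign_index then some dignity else dignityScan rest sign_index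

def get_dignity (planet_name : String) (sign_index : Int) : Option String :=
  match DIGNITY_TABLE.get? planet_name with
  | none => none                                  -- table is None → falsy
  | some table =>
      if table.size = 0 then none                 -- empty dict is falsy too
      else dignityScan table.items sign_index

-- ===== PORT B =====
-- flat literal dict, one entry per (planet, sign) that has a dignity
def LOOKUP : PySem.Dict (String × Int) String := PySem.Dict.ofList [
  (("Sun", (0 : Int)), "Domicile"), (("Sun", 4), "Exaltation"),
  (("Sun", 6), "Detriment"), (("Sun", 10), "Fall"),
  (("Moon", 3), "Domicile"), (("Moon", 1), "Exaltation"),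
  (("Moon", 9), "Detriment"), (("Moon", 7), "Fall"),
  (("Mercury", 1), "Domicile"), (("Mercury", 4), "Domicile"),
  (("Mercury", 5), "Exaltation"), (("Mercury", 7), "Detriment"),
  (("Mercury", 10), "Detriment"), (("Mercury", 11), "Fall"),
  (("Venus", 1), "Domicile"), (("Venus", 11), "Domicile"),
  (("Venus", 5), "Detriment"), (("Venus", 7), "Detriment"),
  (("Mars", 0), "Domicile"), (("Mars", 9), "Exaltation"),
  (("Mars", 6), "Detriment"), (("Mars", 3), "Fall"),
  (("Jupiter", 8), "Domicile"), (("Jupiter", 3), "Exaltation"),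
  (("Jupiter", 2), "Detriment"), (("Jupiter", 9), "Fall"),
  (("Saturn", 9), "Domicile"), (("Saturn", 10), "Exaltation"),
  (("Saturn", 3), "Detriment"), (("Saturn", 4), "Fall")]

def get_dignity_alt (planet_name : String) (sign_index : Int) : Option String :=
  LOOKUP.get? (planet_name, sign_index)

-- ===== PRECONDITION & SPEC =====
def Spec_get_dignity (planet_name : String) (sign_index : Int) (out : Option String) : Prop := out = get_dignity_alt planet_name sign_index
instance (planet_name : String) (sign_index : Int) (out : Option String) : Decidable (Spec_get_dignity planet_name sign_index out) := by unfold Spec_get_dignity; infer_instance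

-- ===== CLAIM (what is proved, stated in full; the proofs are below) =====
def Claim_equal_get_dignity : Prop := ∀ (planet_name : String) (sign_index : Int), Dom_get_dignity planet_name sign_index → Spec_get_dignity planet_name sign_index (get_dignity planet_name sign_index)

-- ===== LEMMAS AND PROOFS =====

theorem TABLE_eq : DIGNITY_TABLE = PySem.Dict.mk [
  ("Sun",     PySem.Dict.mk [("Domicile", [(0:Int)]), ("Exaltation", [4]), ("Detriment", [6]), ("Fall", [10])]),
  ("Moon",    PySem.Dict.mk [("Domicile", [3]), ("Exaltation", [1]), ("Detriment", [9]), ("Fall", [7])]),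
  ("Mercury", PySem.Dict.mk [("Domicile", [1, 4]), ("Exaltation", [5]), ("Detriment", [7, 10]), ("Fall", [11])]),
  ("Venus",   PySem.Dict.mk [("Domicile", [1, 11]), ("Exaltation", [1]), ("Detriment", [5, 7]), ("Fall", [7])]),
  ("Mars",    PySem.Dict.mk [("Domicile", [0]), ("Exaltation", [9]), ("Detriment", [6]), ("Fall", [3])]),
  ("Jupiter", PySem.Dict.mk [("Domicile", [8]), ("Exaltation", [3]), ("Detriment", [2]), ("Fall", [9])]),
  ("Saturn",  PySem.Dict.mk [("Domicile", [9]), ("Exaltation", [10]), ("Detriment", [3]), ("Fall", [4])])] := by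
  decide

theorem LOOKUP_eq : LOOKUP = PySem.Dict.mk [
  (("Sun", (0 : Int)), "Domicile"), (("Sun", 4), "Exaltation"), (("Sun", 6), "Detriment"), (("Sun", 10), "Fall"),
  (("Moon", 3), "Domicile"), (("Moon", 1), "Exaltation"), (("Moon", 9), "Detriment"), (("Moon", 7), "Fall"),
  (("Mercury", 1), "Domicile"), (("Mercury", 4), "Domicile"), (("Mercury", 5), "Exaltation"), (("Mercury", 7), "Detriment"), (("Mercury", 10), "Detriment"), (("Mercury", 11), "Fall"),
  (("Venus", 1), "Domicile"), (("Venus", 11), "Domicile"), (("Venus", 5), "Detriment"), (("Venus", 7), "Detriment"),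
  (("Mars", 0), "Domicile"), (("Mars", 9), "Exaltation"), (("Mars", 6), "Detriment"), (("Mars", 3), "Fall"),
  (("Jupiter", 8), "Domicile"), (("Jupiter", 3), "Exaltation"), (("Jupiter", 2), "Detriment"), (("Jupiter", 9), "Fall"),
  (("Saturn", 9), "Domicile"), (("Saturn", 10), "Exaltation"), (("Saturn", 3), "Detriment"), (("Saturn", 4), "Fall")] := by
  decide

-- ===== VERDICT (by name: the statement is the Claim_ definition above) =====
theorem get_dignity_spec : Claim_equal_get_dignity := by
  intro p s hd
  clear hd
  unfold Spec_get_dignity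
  by_cases h1 : p = "Sun"
  · subst h1
    simp [get_dignity, get_dignity_alt, LOOKUP_eq, TABLE_eq, dignityScan,
      PySem.Dict.get?_mk_cons, PySem.Dict.size, beq_iff_eq]
    split_ifs <;> first | rfl | (exfalso; omega)
  by_cases h2 : p = "Moon"
  · subst h2
    simp [get_dignity, get_dignity_alt, LOOKUP_eq, TABLE_eq, dignityScan,
      PySem.Dict.get?_mk_cons, PySem.Dict.size, beq_iff_eq]
    split_ifs <;> first | rfl | (exfalso; omega)
  by_cases h3 : p = "Mercury"
  · subst h3
    simp [get_dignity, get_dignity_alt, LOOKUP_eq, TABLE_eq, dignityScan,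
      PySem.Dict.get?_mk_cons, PySem.Dict.size, beq_iff_eq]
    split_ifs <;> first | rfl | (exfalso; omega)
  by_cases h4 : p = "Venus"
  · subst h4
    simp [get_dignity, get_dignity_alt, LOOKUP_eq, TABLE_eq, dignityScan,
      PySem.Dict.get?_mk_cons, PySem.Dict.size, beq_iff_eq]
    split_ifs <;> first | rfl | (exfalso; omega)
  by_cases h5 : p = "Mars"
  · subst h5
    simp [get_dignity, get_dignity_alt, LOOKUP_eq, TABLE_eq, dignityScan,
      PySem.Dict.get?_mk_cons, PySem.Dict.size, beq_iff_eq]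
    split_ifs <;> first | rfl | (exfalso; omega)
  by_cases h6 : p = "Jupiter"
  · subst h6
    simp [get_dignity, get_dignity_alt, LOOKUP_eq, TABLE_eq, dignityScan,
      PySem.Dict.get?_mk_cons, PySem.Dict.size, beq_iff_eq]
    split_ifs <;> first | rfl | (exfalso; omega)
  by_cases h7 : p = "Saturn"
  · subst h7
    simp [get_dignity, get_dignity_alt, LOOKUP_eq, TABLE_eq, dignityScan,
      PySem.Dict.get?_mk_cons, PySem.Dict.size, beq_iff_eq]
    split_ifs <;> first | rfl | (exfalso; omega)
  simp [get_dignity, get_dignity_alt, LOOKUP_eq, TABLE_eq,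
    PySem.Dict.get?_mk_cons, beq_iff_eq, Ne.symm h1, Ne.symm h2, Ne.symm h3, Ne.symm h4, Ne.symm h5, Ne.symm h6, Ne.symm h7]
  rfl
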